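-- pv_equiv track=rewrite | github.com/YalfimovIvan/Crypta | affine_recurrent_shifr.py | affine_recurrent_deshifr
-- ===== SOURCE A (Python) =====
-- def nod(a, b):
--     """
--     Вычисляет наибольший общий делитель (НОД) двух чисел.
--     """
--     while b != 0:
--         a, b = b, a % b
--     return a
--
-- def mod_obrat(a, m):
--     """
--     Находит модулярное обратное к a по модулю m.
--     Использует расширенный алгоритм Евклида.
--     """
--     if nod(a, m) != 1:
--         return None  # Обратное существует только если a и m взаимно просты
--
--     # Инициализация переменных
--     x_prev, x_curr = 1, 0
--     y_prev, y_curr = 0, 1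
--     m_orig = m  # Сохраняем исходное значение m
--
--     while m != 0:
--         q = a // m  # Частное
--         a, m = m, a % m  # Обновляем a и m
--         # Обновляем коэффициенты
--         x_prev, x_curr = x_curr, x_prev - q * x_curr
--         y_prev, y_curr = y_curr, y_prev - q * y_curr
--
--     # Возвращаем x_prev, приведённое по модулю m_orig
--     return x_prev % m_orig
--
-- def affine_recurrent_deshifr(text, a1, a2, b1, b2, alph):
--     """
--     Дешифрует текст, зашифрованный аффинным рекуррентным шифром.
--     """
--     deshifr_text = ""
--     m = len(alph)
--     a_prev, a_curr = a1, a2  # Инициализация ключей a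
--     b_prev, b_curr = b1, b2  # Инициализация ключей b
--     for symbol in text:
--         if symbol in alph:
--             y = alph.index(symbol)  # Символ в виде числа
--             a_obr = mod_obrat(a_curr, m)  # Обратное к a_curr по модулю m
--             if a_obr is None:
--                 return "Ошибка: ключ 'a' и размер алфавита не взаимно просты."
--             x = a_obr * (y - b_curr) % m  # Дешифрование
--             deshifr_text += alph[x]
--             # Обновление ключей
--             a_next = (a_curr * a_prev) % m
--             b_next = (b_curr + b_prev) % m
--             a_prev, a_curr = a_curr, a_next
--             b_prev, b_curr = b_curr, b_next
--         else:
--             deshifr_text += symbol  # Оставляем символы, не входящие в алфавит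
--     return deshifr_text
-- ===== SOURCE B (Python) =====
-- def nod(a, b):
--     while b != 0:
--         a, b = b, a % b
--     return a
--
-- def mod_obrat(a, m):
--     if nod(a, m) != 1:
--         return None
--     x_prev, x_curr = 1, 0
--     y_prev, y_curr = 0, 1
--     m_orig = m
--     while m != 0:
--         q = a // m
--         a, m = m, a % m
--         x_prev, x_curr = x_curr, x_prev - q * x_curr
--         y_prev, y_curr = y_curr, y_prev - q * y_curr
--     return x_prev % m_orig
--
-- def affine_recurrent_deshifr(text, a1, a2, b1, b2, alph):
--     m = len(alph)
--     # first-occurrence index of each alphabet symbol, built once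
--     idx = {}
--     for i, c in enumerate(alph):
--         idx.setdefault(c, i)
--     # key schedule: one (a_inverse, b) pair per in-alphabet symbol of text
--     n = sum(1 for c in text if c in idx)
--     sched = []
--     a_prev, a_curr, b_prev, b_curr = a1, a2, b1, b2
--     for _ in range(n):
--         inv = mod_obrat(a_curr, m)
--         if inv is None:
--             return "Ошибка: ключ 'a' и размер алфавита не взаимно просты."
--         sched.append((inv, b_curr))
--         a_prev, a_curr = a_curr, (a_curr * a_prev) % m
--         b_prev, b_curr = b_curr, (b_curr + b_prev) % m
--     # decryption pass consuming the schedule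
--     out = []
--     k = 0
--     for c in text:
--         y = idx.get(c)
--         if y is None:
--             out.append(c)
--         else:
--             inv, b = sched[k]
--             k += 1
--             out.append(alph[inv * (y - b) % m])
--     return ''.join(out)
-- ===== Notes on version B (the rewrite author's own statement) =====
-- stated objective: alternative
-- what changed: B replaces A's single interleaved loop (which rescans alph with .index and recomputes the key state per symbol) by a first-occurrence index dict built once, a precomputed key schedule of (a_inverse, b) pairs of exactly the needed length, and a separate decryption pass that consumes the schedule.
import Mathlib
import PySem

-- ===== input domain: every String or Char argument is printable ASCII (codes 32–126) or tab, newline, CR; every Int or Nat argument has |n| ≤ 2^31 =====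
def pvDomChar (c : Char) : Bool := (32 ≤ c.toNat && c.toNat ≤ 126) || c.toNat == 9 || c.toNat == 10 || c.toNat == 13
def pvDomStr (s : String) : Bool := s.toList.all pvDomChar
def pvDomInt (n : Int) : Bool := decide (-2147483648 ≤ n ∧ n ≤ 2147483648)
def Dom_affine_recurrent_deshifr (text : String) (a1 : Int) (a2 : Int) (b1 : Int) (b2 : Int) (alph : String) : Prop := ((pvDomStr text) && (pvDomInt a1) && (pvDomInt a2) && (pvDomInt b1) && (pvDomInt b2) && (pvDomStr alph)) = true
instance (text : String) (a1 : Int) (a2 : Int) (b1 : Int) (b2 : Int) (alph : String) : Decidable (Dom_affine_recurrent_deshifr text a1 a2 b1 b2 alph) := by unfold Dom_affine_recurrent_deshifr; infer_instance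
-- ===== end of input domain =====

-- B separates key-schedule construction (one precomputed table of (a_inverse, b) pairs plus a
-- first-occurrence index dict built once) from the decryption traversal, instead of A's single
-- interleaved loop with repeated alph.index scans; objective: alternative decomposition.

-- termination helper for the Euclid-style loops below (cited by their decreasing_by)
theorem pvModNatAbsLt (a b : Int) (hb : b ≠ 0) : (PySem.Int.mod a b).natAbs < b.natAbs := by
  rcases lt_or_gt_of_ne hb with h | h
  · have := PySem.Int.mod_neg_bounds a h; omega
  · have h1 := PySem.Int.mod_nonneg a h; have h2 := PySem.Int.mod_lt a h; omega

-- ===== PORT A =====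
-- shared-module helper nod(a, b)
def pvNod (a b : Int) : Int :=
  if _hb : b = 0 then a else pvNod b (PySem.Int.mod a b)
termination_by b.natAbs
decreasing_by exact pvModNatAbsLt a b _hb

-- the extended-Euclid while-loop of mod_obrat (returns final x_prev; y coefficients carried as in the Python)
def pvEgcd (a m x_prev x_curr y_prev y_curr : Int) : Int :=
  if _hm : m = 0 then x_prev
  else pvEgcd m (PySem.Int.mod a m) x_curr (x_prev - PySem.Int.floordiv a m * x_curr)
         y_curr (y_prev - PySem.Int.floordiv a m * y_curr)
termination_by m.natAbs
decreasing_by exact pvModNatAbsLt a m _hm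

-- shared-module helper mod_obrat(a, m); none = Python's None
def pvModObrat (a m : Int) : Option Int :=
  if pvNod a m ≠ 1 then none
  else some (PySem.Int.mod (pvEgcd a m 1 0 0 1) m)

def pvErr : String := "Ошибка: ключ 'a' и размер алфавита не взаимно просты."

-- A's for-loop; deshifr_text is accumulated as List Char (Python's str += on these chars, exact)
def pvALoop (alph : List Char) (m : Int) : List Char → List Char → Int → Int → Int → Int → String
  | [], acc, _, _, _, _ => String.ofList acc
  | c :: rest, acc, a_prev, a_curr, b_prev, b_curr =>
    if c ∈ alph then   -- 'symbol in alph' (single char: membership)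
      -- y = alph.index(symbol); getD 0 never fires: membership guarantees some
      let y : Int := (((PySem.List.index? alph c).getD 0 : Nat) : Int)
      match pvModObrat a_curr m with
      | none => pvErr
      | some a_obr =>
        let x := PySem.Int.mod (a_obr * (y - b_curr)) m
        -- alph[x]; getD ' ' never fires: 0 ≤ x < m = len(alph)
        pvALoop alph m rest (acc ++ [(PySem.List.pyGet? alph x).getD ' '])
          a_curr (PySem.Int.mod (a_curr * a_prev) m) b_curr (PySem.Int.mod (b_curr + b_prev) m)
    else
      pvALoop alph m rest (acc ++ [c]) a_prev a_curr b_prev b_curr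

def affine_recurrent_deshifr (text : String) (a1 : Int) (a2 : Int) (b1 : Int) (b2 : Int) (alph : String) : String :=
  pvALoop alph.toList (PySem.Str.len alph) text.toList [] a1 a2 b1 b2

-- ===== PORT B =====
-- idx = {}; for i, c in enumerate(alph): idx.setdefault(c, i)
def pvBIdx (alph : List Char) : PySem.Dict Char Int :=
  (PySem.List.enumerate alph 0).foldl (fun d p => d.setdefault p.2 p.1) PySem.Dict.empty

-- the schedule loop: n iterations from the initial key state; none = the error return
def pvSched (m : Int) : Nat → Int → Int → Int → Int → Option (List (Int × Int))
  | 0, _, _, _, _ => some []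
  | n + 1, a_prev, a_curr, b_prev, b_curr =>
    match pvModObrat a_curr m with
    | none => none
    | some inv =>
      (pvSched m n a_curr (PySem.Int.mod (a_curr * a_prev) m)
         b_curr (PySem.Int.mod (b_curr + b_prev) m)).map (fun t => (inv, b_curr) :: t)

-- the decryption pass: consumes the schedule front-to-back (Source B's sched[k]; k += 1)
def pvBPass (alph : List Char) (idx : PySem.Dict Char Int) (m : Int) : List Char → List (Int × Int) → List Char
  | [], _ => []
  | c :: rest, sched =>
    match idx.get? c with
    | none => c :: pvBPass alph idx m rest sched
    | some y =>
      match sched with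
      | [] => []   -- unreachable: the schedule has one entry per in-alphabet symbol
      | (inv, b) :: s =>
        (PySem.List.pyGet? alph (PySem.Int.mod (inv * (y - b)) m)).getD ' ' :: pvBPass alph idx m rest s

def affine_recurrent_deshifr_alt (text : String) (a1 : Int) (a2 : Int) (b1 : Int) (b2 : Int) (alph : String) : String :=
  -- n = sum(1 for c in text if c in idx); then the schedule, then the decryption pass
  match pvSched (PySem.Str.len alph) (text.toList.countP (fun c => (pvBIdx alph.toList).contains c)) a1 a2 b1 b2 with
  | none => pvErr
  | some sch => String.ofList (pvBPass alph.toList (pvBIdx alph.toList) (PySem.Str.len alph) text.toList sch)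

-- ===== PRECONDITION & SPEC =====
def Spec_affine_recurrent_deshifr (text : String) (a1 : Int) (a2 : Int) (b1 : Int) (b2 : Int) (alph : String) (out : String) : Prop := out = affine_recurrent_deshifr_alt text a1 a2 b1 b2 alph
instance (text : String) (a1 : Int) (a2 : Int) (b1 : Int) (b2 : Int) (alph : String) (out : String) : Decidable (Spec_affine_recurrent_deshifr text a1 a2 b1 b2 alph out) := by unfold Spec_affine_recurrent_deshifr; infer_instance

-- ===== CLAIM (what is proved, stated in full; the proofs are below) =====
def Claim_equal_affine_recurrent_deshifr : Prop := ∀ (text : String) (a1 : Int) (a2 : Int) (b1 : Int) (b2 : Int) (alph : String), Dom_affine_recurrent_deshifr text a1 a2 b1 b2 alph → Spec_affine_recurrent_deshifr text a1 a2 b1 b2 alph (affine_recurrent_deshifr text a1 a2 b1 b2 alph)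

-- ===== LEMMAS AND PROOFS =====

-- the first-wins dict lookup, generalized over the start index and the accumulated dict
theorem pvBIdx_aux (al : List Char) (s : Int) (d : PySem.Dict Char Int) (c : Char) :
    ((PySem.List.enumerate al s).foldl (fun d p => d.setdefault p.2 p.1) d).get? c
      = (d.get? c).or ((PySem.List.index? al c).map (fun k => s + (k : Int))) := by
  induction al generalizing s d with
  | nil => simp [PySem.List.enumerate_nil, PySem.List.index?]
  | cons x xs ih =>
    rw [PySem.List.enumerate_cons]
    simp only [List.foldl_cons]
    rw [ih]
    by_cases hc : c = x
    · subst hc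
      rw [PySem.List.index?_cons_self]
      by_cases hcon : d.contains c = true
      · rw [PySem.Dict.setdefault_of_contains d s hcon]
        have : (d.get? c).isSome := by rw [← PySem.Dict.contains_eq_isSome_get?]; exact hcon
        rcases Option.isSome_iff_exists.mp this with ⟨v, hv⟩
        simp [hv]
      · rw [PySem.Dict.setdefault_of_not_contains d s (by simpa using hcon)]
        have hnone : d.get? c = none := by
          have := PySem.Dict.contains_eq_isSome_get? d c
          rw [Bool.not_eq_true] at hcon
          rw [hcon] at this
          cases h : d.get? c <;> simp [h] at this ⊢
        rw [PySem.Dict.get?_insert]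
        simp [hnone]
    · have hget : (d.setdefault x s).get? c = d.get? c := by
        by_cases hcon : d.contains x = true
        · rw [PySem.Dict.setdefault_of_contains d s hcon]
        · rw [PySem.Dict.setdefault_of_not_contains d s (by simpa using hcon)]
          rw [PySem.Dict.get?_insert]
          simp [hc]
      rw [hget, PySem.List.index?_cons_of_ne xs (fun h => hc h.symm)]
      cases h : PySem.List.index? xs c with
      | none => simp
      | some k => simp; congr 1; omega

theorem pvBIdx_get? (al : List Char) (c : Char) :
    (pvBIdx al).get? c = (PySem.List.index? al c).map (fun k => (k : Int)) := by
  rw [pvBIdx, pvBIdx_aux]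
  simp [PySem.Dict.get?_empty]

theorem pvBIdx_contains (al : List Char) (c : Char) :
    (pvBIdx al).contains c = decide (c ∈ al) := by
  rw [PySem.Dict.contains_eq_isSome_get?, pvBIdx_get?]
  by_cases h : c ∈ al
  · rcases Option.isSome_iff_exists.mp ((PySem.List.index?_isSome_iff al c).mpr h) with ⟨k, hk⟩
    rw [hk]; simp [h]
  · rw [(PySem.List.index?_eq_none_iff al c).mpr h]
    simp [h]

-- the heart of the file: A's interleaved loop equals schedule-then-pass from the same key state
theorem pvMain (alph : List Char) (m : Int) (cs : List Char) :
    ∀ (acc : List Char) (ap ac bp bc : Int),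
      pvALoop alph m cs acc ap ac bp bc
        = match pvSched m (cs.countP (fun c => (pvBIdx alph).contains c)) ap ac bp bc with
          | none => pvErr
          | some sch => String.ofList (acc ++ pvBPass alph (pvBIdx alph) m cs sch) := by
  induction cs with
  | nil => intro acc ap ac bp bc; simp [pvALoop, pvSched, pvBPass]
  | cons c rest ih =>
    intro acc ap ac bp bc
    by_cases hc : c ∈ alph
    · have hcon : (pvBIdx alph).contains c = true := by rw [pvBIdx_contains]; simpa
      obtain ⟨k, hk⟩ := Option.isSome_iff_exists.mp ((PySem.List.index?_isSome_iff alph c).mpr hc)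
      have hcount : (c :: rest).countP (fun c => (pvBIdx alph).contains c)
          = rest.countP (fun c => (pvBIdx alph).contains c) + 1 := by
        simp [hcon]
      rw [hcount]
      rw [pvALoop, if_pos hc]
      cases hobr : pvModObrat ac m with
      | none => simp [pvSched, hobr]
      | some inv =>
        simp only [pvSched, hobr]
        rw [ih]
        cases hs : pvSched m (rest.countP (fun c => (pvBIdx alph).contains c)) ac
            (PySem.Int.mod (ac * ap) m) bc (PySem.Int.mod (bc + bp) m) with
        | none => simp
        | some sch =>
          simp only [Option.map_some]
          have hpass : pvBPass alph (pvBIdx alph) m (c :: rest) ((inv, bc) :: sch)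
              = (PySem.List.pyGet? alph
                    (PySem.Int.mod (inv * ((((PySem.List.index? alph c).getD 0 : Nat) : Int) - bc)) m)).getD ' '
                  :: pvBPass alph (pvBIdx alph) m rest sch := by
            rw [pvBPass, pvBIdx_get?, hk]
            simp
          rw [hpass]
          simp [List.append_assoc]
    · have hcon : (pvBIdx alph).contains c = false := by rw [pvBIdx_contains]; simpa
      have hget : (pvBIdx alph).get? c = none := by
        rw [pvBIdx_get?, (PySem.List.index?_eq_none_iff alph c).mpr hc]
        rfl
      have hcount : (c :: rest).countP (fun c => (pvBIdx alph).contains c)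
          = rest.countP (fun c => (pvBIdx alph).contains c) := by
        simp [hcon]
      rw [hcount, pvALoop, if_neg hc, ih]
      cases hs : pvSched m (rest.countP (fun c => (pvBIdx alph).contains c)) ap ac bp bc with
      | none => simp
      | some sch =>
        have hpass : pvBPass alph (pvBIdx alph) m (c :: rest) sch
            = c :: pvBPass alph (pvBIdx alph) m rest sch := by
          rw [pvBPass, hget]
        simp [hpass, List.append_assoc]

-- ===== VERDICT (by name: the statement is the Claim_ definition above) =====
theorem affine_recurrent_deshifr_spec : Claim_equal_affine_recurrent_deshifr := by
  intro text a1 a2 b1 b2 alph _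
  unfold Spec_affine_recurrent_deshifr affine_recurrent_deshifr affine_recurrent_deshifr_alt
  rw [pvMain]
  simp
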